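-- pv_equiv track=rewrite | github.com/swierczj/hackaton21 | parsing_output/parse_error.py | get_java_error
-- ===== SOURCE A (Python) =====
-- from typing import List
--
-- def get_java_error(line: List[str]):
--     error_found = False
--     error_line = str()
--     for word in line:
--         if word == "error:":
--             error_found = True
--         if error_found:
--             error_line += word + ' '
--     error_line = error_line.rstrip()
--     return error_line
-- ===== SOURCE B (Python) =====
-- def get_java_error(line):
--     if "error:" not in line:
--         return ""
--     i = line.index("error:")
--     return ' '.join(line[i:]).rstrip()
-- ===== Notes on version B (the rewrite author's own statement) =====
-- stated objective: simpler
-- what changed: Replaces the flag-carrying word-by-word accumulation loop with computing the split point once via list.index and bulk-joining the tail with ' '.join, rstripped.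
import Mathlib
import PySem

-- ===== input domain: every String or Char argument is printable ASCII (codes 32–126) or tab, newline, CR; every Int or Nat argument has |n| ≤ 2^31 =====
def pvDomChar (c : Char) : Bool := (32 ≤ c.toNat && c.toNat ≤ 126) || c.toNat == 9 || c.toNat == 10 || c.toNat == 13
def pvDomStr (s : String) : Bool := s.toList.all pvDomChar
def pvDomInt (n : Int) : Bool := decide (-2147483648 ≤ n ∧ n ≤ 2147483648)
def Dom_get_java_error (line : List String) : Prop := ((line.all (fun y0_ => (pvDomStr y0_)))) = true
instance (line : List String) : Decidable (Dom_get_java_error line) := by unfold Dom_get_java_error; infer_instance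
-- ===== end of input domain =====

-- B computes the split point once with list.index and bulk-joins the tail, instead of A's
-- flag-carrying word-by-word accumulation; objective: simpler.

-- ===== PORT A =====
-- literal port of A: fold over the words carrying (error_found, error_line); rstrip at the end
def get_java_error (line : List String) : String :=
  let st := line.foldl
    (fun (st : Bool × String) word =>
      let error_found := if word = "error:" then true else st.1
      (error_found, if error_found then st.2 ++ word ++ " " else st.2))
    (false, "")
  PySem.Str.rstrip st.2

-- ===== PORT B =====
-- literal port of Source B: membership test, first index, join of the tail slice, rstrip
def get_java_error_alt (line : List String) : String :=
  if line.contains "error:" then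
    match PySem.List.index? line "error:" with
    | some i => PySem.Str.rstrip (PySem.Str.join " " (PySem.List.slice line (some (i : Int)) none))
    | none => ""
  else ""

-- ===== PRECONDITION & SPEC =====
def Spec_get_java_error (line : List String) (out : String) : Prop := out = get_java_error_alt line
instance (line : List String) (out : String) : Decidable (Spec_get_java_error line out) := by unfold Spec_get_java_error; infer_instance

-- ===== CLAIM (what is proved, stated in full; the proofs are below) =====
def Claim_equal_get_java_error : Prop := ∀ (line : List String), Dom_get_java_error line → Spec_get_java_error line (get_java_error line)

-- ===== LEMMAS AND PROOFS =====

-- B's shape once the index is known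
lemma alt_of_index (line : List String) (i : Nat)
    (hc : line.contains "error:" = true)
    (hi : PySem.List.index? line "error:" = some i) :
    get_java_error_alt line
      = PySem.Str.rstrip (PySem.Str.join " " (PySem.List.slice line (some (i : Int)) none)) := by
  unfold get_java_error_alt
  rw [if_pos hc, hi]

-- A's loop body, named for the lemmas
def pvStepA (st : Bool × String) (word : String) : Bool × String :=
  let error_found := if word = "error:" then true else st.1
  (error_found, if error_found then st.2 ++ word ++ " " else st.2)

lemma get_java_error_eq_foldl (line : List String) :
    get_java_error line = PySem.Str.rstrip (line.foldl pvStepA (false, "")).2 := rfl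

-- once the flag is true it stays true and every word is appended with a trailing space
lemma foldA_true (ws : List String) : ∀ (acc : String),
    ws.foldl pvStepA (true, acc) = (true, ws.foldl (fun s w => s ++ w ++ " ") acc) := by
  induction ws with
  | nil => intro acc; rfl
  | cons w ws ih =>
    intro acc
    simp only [List.foldl_cons, pvStepA, ite_self]
    exact ih (acc ++ w ++ " ")

lemma foldA_append_toList (ws : List String) : ∀ (acc : String),
    (ws.foldl (fun s w => s ++ w ++ " ") acc).toList
      = acc.toList ++ ws.flatMap (fun w => w.toList ++ [' ']) := by
  induction ws with
  | nil => intro acc; simp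
  | cons w ws ih =>
    intro acc
    simp [ih (acc ++ w ++ " ")]

-- the flat "word + space" accumulation is the space-join of the words plus one trailing space
lemma flatMap_eq_join_space (w : String) (ws : List String) :
    (w :: ws).flatMap (fun w => w.toList ++ [' '])
      = PySem.Chars.join [' '] ((w :: ws).map String.toList) ++ [' '] := by
  induction ws generalizing w with
  | nil => simp [PySem.Chars.join, List.intercalate]
  | cons v ws ih =>
    simp only [List.flatMap_cons, List.map_cons]
    rw [PySem.Chars.join_cons_cons]
    have := ih v
    simp only [List.flatMap_cons, List.map_cons] at this
    rw [this]
    simp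

lemma rstrip_append_space (s : List Char) :
    PySem.Chars.rstrip (s ++ [' ']) = PySem.Chars.rstrip s := by
  simp [PySem.Chars.rstrip,
        show PySem.Chars.isspace ' ' = true from by decide]

theorem get_java_error_agree (line : List String) :
    get_java_error line = get_java_error_alt line := by
  induction line with
  | nil => rfl
  | cons w ws ih =>
    by_cases hw : w = "error:"
    · subst hw
      -- A: flag turns true at the head; every word from here is accumulated
      apply String.toList_injective
      rw [get_java_error_eq_foldl]
      simp only [List.foldl_cons]
      rw [show pvStepA (false, "") "error:" = (true, "error: ") from rfl]
      rw [foldA_true]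
      have hc : (("error:" :: ws).contains "error:") = true := by
        simp
      rw [alt_of_index ("error:" :: ws) 0 hc (PySem.List.index?_cons_self _ _)]
      rw [show PySem.List.slice ("error:" :: ws) (some ((0 : Nat) : Int)) none
            = "error:" :: ws from by rw [PySem.List.slice_from_natCast]; rfl]
      rw [PySem.Str.toList_rstrip, PySem.Str.toList_rstrip, PySem.Str.toList_join]
      rw [foldA_append_toList ws ("error: " : String)]
      have hflat := flatMap_eq_join_space "error:" ws
      simp only [List.flatMap_cons] at hflat
      have hkey : ("error: " : String).toList ++ ws.flatMap (fun w => w.toList ++ [' '])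
          = PySem.Chars.join [' '] (("error:" :: ws).map String.toList) ++ [' '] := by
        rw [← hflat]; rfl
      rw [hkey, rstrip_append_space]
      rfl
    · -- head is not "error:": A skips it, B's index shifts by one
      rw [get_java_error_eq_foldl]
      simp only [List.foldl_cons]
      rw [show pvStepA (false, "") w = (false, "") from by
        simp [pvStepA, hw]]
      rw [← get_java_error_eq_foldl, ih]
      have hc : ((w :: ws).contains "error:") = (ws.contains "error:") := by
        rw [List.contains_cons, beq_eq_false_iff_ne.mpr (Ne.symm hw), Bool.false_or]
      by_cases hm : ws.contains "error:" = true
      · have hmem : "error:" ∈ ws := by simpa using hm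
        cases hi : PySem.List.index? ws "error:" with
        | none =>
          exact absurd hi (by
            simp [PySem.List.index?_eq_idxOf?, List.idxOf?_eq_none_iff, hmem])
        | some i =>
          rw [alt_of_index ws i hm hi,
              alt_of_index (w :: ws) (i + 1) (by rw [hc]; exact hm)
                (by rw [PySem.List.index?_cons_of_ne ws hw, hi]; rfl)]
          rw [show PySem.List.slice (w :: ws) (some ((i + 1 : Nat) : Int)) none
                = PySem.List.slice ws (some ((i : Nat) : Int)) none from by
            rw [PySem.List.slice_from_natCast, PySem.List.slice_from_natCast]
            rfl]
      · unfold get_java_error_alt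
        rw [hc, if_neg hm, if_neg hm]

-- ===== VERDICT (by name: the statement is the Claim_ definition above) =====
theorem get_java_error_spec : Claim_equal_get_java_error := by
  intro line _
  unfold Spec_get_java_error
  exact get_java_error_agree line
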